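-- pv_equiv track=rewrite | github.com/Arunsaini88/AI_Socila_media_manager_Agent | content_generator.py | _distribute_post_types
-- ===== SOURCE A (Python) =====
-- from typing import Dict, List, Optional
--
-- def _distribute_post_types(frequency: int, preferred_types: List[str]) -> List[str]:
--     """Distribute post types across the requested frequency"""
--     if not preferred_types:
--         preferred_types = ['promo', 'tip', 'update']
--
--     post_types = []
--
--     # Ensure variety in post types
--     for i in range(frequency):
--         post_type = preferred_types[i % len(preferred_types)]
--         post_types.append(post_type)
--
--     return post_types
-- ===== SOURCE B (Python) =====
-- def _distribute_post_types(frequency, preferred_types):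
--     if not preferred_types:
--         preferred_types = ['promo', 'tip', 'update']
--     n = max(frequency, 0)
--     return (preferred_types * (n // len(preferred_types) + 1))[:n]
-- ===== Notes on version B (the rewrite author's own statement) =====
-- stated objective: idiomatic
-- what changed: Replaces the explicit index loop with modular indexing by list replication (preferred_types * (n//len+1)) followed by a slice [:n], with frequency clamped to >= 0.
import Mathlib
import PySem

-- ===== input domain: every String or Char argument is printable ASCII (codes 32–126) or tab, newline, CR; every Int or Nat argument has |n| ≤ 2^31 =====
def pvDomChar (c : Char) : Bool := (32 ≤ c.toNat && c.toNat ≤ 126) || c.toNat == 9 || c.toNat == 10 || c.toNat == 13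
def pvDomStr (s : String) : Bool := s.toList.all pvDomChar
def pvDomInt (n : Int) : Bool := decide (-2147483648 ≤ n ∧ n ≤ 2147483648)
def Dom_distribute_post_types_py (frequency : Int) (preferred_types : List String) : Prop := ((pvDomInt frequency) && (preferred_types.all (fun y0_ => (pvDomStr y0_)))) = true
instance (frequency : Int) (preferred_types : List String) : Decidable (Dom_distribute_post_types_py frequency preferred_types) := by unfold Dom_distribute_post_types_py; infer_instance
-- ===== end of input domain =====

-- B replaces A's explicit index loop by list replication plus a slice (same values, same cost; objective: idiomatic).

-- ===== PORT A =====
-- pyGetD is exact here: the index i % len(pts) always lies in range since pts is nonempty, so the default is never used.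
def distribute_post_types_py (frequency : Int) (preferred_types : List String) : List String :=
  let pts := if preferred_types = [] then ["promo", "tip", "update"] else preferred_types
  (PySem.List.pyRange 0 frequency 1).foldl
    (fun acc i => acc ++ [PySem.List.pyGetD pts (PySem.Int.mod i (pts.length : Int)) ""]) []

-- ===== PORT B =====
def distribute_post_types_py_alt (frequency : Int) (preferred_types : List String) : List String :=
  let pts := if preferred_types = [] then ["promo", "tip", "update"] else preferred_types
  let n : Int := max frequency 0
  PySem.List.slice ((List.replicate (PySem.Int.floordiv n (pts.length : Int) + 1).toNat pts).flatten) none (some n)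

-- ===== PRECONDITION & SPEC =====
def Spec_distribute_post_types_py (frequency : Int) (preferred_types : List String) (out : List String) : Prop := out = distribute_post_types_py_alt frequency preferred_types
instance (frequency : Int) (preferred_types : List String) (out : List String) : Decidable (Spec_distribute_post_types_py frequency preferred_types out) := by unfold Spec_distribute_post_types_py; infer_instance

-- ===== CLAIM (what is proved, stated in full; the proofs are below) =====
def Claim_equal_distribute_post_types_py : Prop := ∀ (frequency : Int) (preferred_types : List String), Dom_distribute_post_types_py frequency preferred_types → Spec_distribute_post_types_py frequency preferred_types (distribute_post_types_py frequency preferred_types)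

-- ===== LEMMAS AND PROOFS =====

lemma getElem_flatten_replicate {α : Type} (pts : List α) (k i : Nat)
    (h : i < ((List.replicate k pts).flatten).length)
    (h' : i < k * pts.length) :
    ((List.replicate k pts).flatten)[i] = pts[i % pts.length]'(Nat.mod_lt _ (by by_contra hc; simp [Nat.le_zero.mp (Nat.not_lt.mp hc)] at h')) := by
  induction k generalizing i with
  | zero => omega
  | succ k ih =>
    have hflat : (List.replicate (k+1) pts).flatten = pts ++ (List.replicate k pts).flatten := by
      simp [List.replicate_succ]
    by_cases hi : i < pts.length
    · have := Nat.mod_eq_of_lt hi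
      simp [hflat, hi, this]
    · rw [Nat.not_lt] at hi
      have hlen : ((List.replicate k pts).flatten).length = k * pts.length := by
        simp [List.length_flatten]
      have hfl : ((List.replicate (k+1) pts).flatten).length = (k+1) * pts.length := by
        simp [List.length_flatten]
      have hsm : (k+1) * pts.length = k * pts.length + pts.length := Nat.succ_mul k pts.length
      have h2 : i - pts.length < ((List.replicate k pts).flatten).length := by
        rw [hlen]; rw [hfl] at h; omega
      have hmod : (i - pts.length) % pts.length = i % pts.length := by
        rw [← Nat.mod_eq_sub_mod hi]
      have hposlen : 0 < pts.length := by
        rcases Nat.eq_zero_or_pos pts.length with h0 | h0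
        · rw [h0, Nat.mul_zero] at h'; omega
        · exact h0
      calc ((List.replicate (k+1) pts).flatten)[i]
          = (pts ++ (List.replicate k pts).flatten)[i]'(by rw [← hflat]; exact h) := by
            simp only [hflat]
        _ = ((List.replicate k pts).flatten)[i - pts.length]'h2 := by
            rw [List.getElem_append_right hi]
        _ = pts[(i - pts.length) % pts.length]'(Nat.mod_lt _ hposlen) := ih _ h2 (by rw [hlen] at h2; exact h2)
        _ = _ := by simp [hmod]

lemma flatten_take_eq_map_range (pts : List String) (hne : pts ≠ []) (n : Nat) :
    ((List.replicate (n / pts.length + 1) pts).flatten).take n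
      = (List.range n).map (fun k => pts.getD (k % pts.length) "") := by
  have hpos : 0 < pts.length := List.length_pos_iff.mpr hne
  have hlen : ((List.replicate (n / pts.length + 1) pts).flatten).length
      = (n / pts.length + 1) * pts.length := by
    simp [List.length_flatten, Nat.mul_comm]
  have hbig : n ≤ (n / pts.length + 1) * pts.length := by
    have := Nat.div_add_mod n pts.length
    have := Nat.mod_lt n hpos
    nlinarith
  apply List.ext_getElem
  · simp [hlen]; omega
  · intro i h1 h2
    have hi : i < n := by simpa [hlen] using h2
    rw [List.getElem_take]
    rw [getElem_flatten_replicate pts _ i (by rw [hlen]; omega) (by omega)]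
    simp [List.getD_eq_getElem?_getD, List.getElem?_eq_getElem (Nat.mod_lt i hpos)]

lemma main_eq (frequency : Int) (pts : List String) (hne : pts ≠ []) :
    (PySem.List.pyRange 0 frequency 1).foldl
      (fun acc i => acc ++ [PySem.List.pyGetD pts (PySem.Int.mod i (pts.length : Int)) ""]) []
    = PySem.List.slice ((List.replicate (PySem.Int.floordiv (max frequency 0) (pts.length : Int) + 1).toNat pts).flatten)
        none (some (max frequency 0)) := by
  have hpos : 0 < pts.length := List.length_pos_iff.mpr hne
  obtain ⟨n, hn⟩ : ∃ n : Nat, max frequency 0 = (n : Int) :=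
    ⟨(max frequency 0).toNat, by omega⟩
  have hfn : (frequency - 0).toNat = n := by omega
  have hdiv : (PySem.Int.floordiv (n : Int) (pts.length : Int) + 1).toNat = n / pts.length + 1 := by
    rw [PySem.Int.floordiv_natCast, ← Nat.cast_one, ← Nat.cast_add, Int.toNat_natCast]
  rw [PySem.List.foldl_append_singleton_eq_map, hn, hdiv, PySem.List.slice_to_natCast,
    flatten_take_eq_map_range pts hne n, PySem.List.pyRange_one, hfn]
  simp only [List.nil_append, List.map_map]
  apply List.map_congr_left
  intro k _
  simp only [Function.comp_apply, zero_add]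
  rw [PySem.Int.mod_natCast k pts.length, PySem.List.pyGetD_natCast]

-- ===== VERDICT (by name: the statement is the Claim_ definition above) =====
theorem distribute_post_types_py_spec : Claim_equal_distribute_post_types_py := by
  intro frequency preferred_types _
  unfold Spec_distribute_post_types_py distribute_post_types_py distribute_post_types_py_alt
  by_cases h : preferred_types = [] <;>
    simp only [h, ite_true, ite_false] <;>
    exact main_eq _ _ (by simp [h])
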